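-- pv_equiv track=rewrite | github.com/geranazavr555/itmo | sem6/machine-learning/lab1/cfml/statistics.py | _sum_distances
-- ===== SOURCE A (Python) =====
-- def _sum_distances(X):
--     X = sorted(X)
--     result = 0
--     add = 0
--     for i in range(1, len(X)):
--         local_add = i * (X[i] - X[i - 1])
--         result += add
--         result += local_add
--         add += local_add
--     return result * 2
-- ===== SOURCE B (Python) =====
-- def _sum_distances(X):
--     total = 0
--     rest = X
--     for x in X:
--         rest = rest[1:]
--         for y in rest:
--             total += abs(x - y)
--     return 2 * total
-- ===== Notes on version B (the rewrite author's own statement) =====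
-- stated objective: simpler
-- what changed: Replaces the sort plus algebraic prefix-accumulator pass by a direct double loop that sums |x - y| over all unordered pairs in the original (unsorted) order and doubles it.
import Mathlib
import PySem

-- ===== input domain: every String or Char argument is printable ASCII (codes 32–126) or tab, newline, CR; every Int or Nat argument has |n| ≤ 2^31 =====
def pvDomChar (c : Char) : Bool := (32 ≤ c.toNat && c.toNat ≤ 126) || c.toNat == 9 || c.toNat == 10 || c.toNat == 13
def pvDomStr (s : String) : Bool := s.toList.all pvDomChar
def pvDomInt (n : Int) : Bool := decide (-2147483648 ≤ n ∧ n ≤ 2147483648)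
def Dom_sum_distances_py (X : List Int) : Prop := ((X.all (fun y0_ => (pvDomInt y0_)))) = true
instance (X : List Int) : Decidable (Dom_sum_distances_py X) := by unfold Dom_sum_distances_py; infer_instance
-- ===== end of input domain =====

-- B replaces A's sort + prefix-accumulator pass by a plain double loop over all pairs; return values only, no mutation.

-- ===== PORT A =====
def sum_distances_py (X : List Int) : Int :=
  let Xs := PySem.List.sorted X (fun x => x) false
  let st := (PySem.List.pyRange 1 (Xs.length : Int) 1).foldl
    (fun (st : Int × Int) i =>
      let local_add := i * (PySem.List.pyGetD Xs i 0 - PySem.List.pyGetD Xs (i - 1) 0)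
      (st.1 + st.2 + local_add, st.2 + local_add)) (0, 0)
  st.1 * 2

-- ===== PORT B =====
def sum_distances_py_alt (X : List Int) : Int :=
  let st := X.foldl
    (fun (st : Int × List Int) x =>
      let rest := PySem.List.slice st.2 (some 1) none
      (rest.foldl (fun t y => t + |x - y|) st.1, rest)) (0, X)
  2 * st.1

-- ===== PRECONDITION & SPEC =====
def Spec_sum_distances_py (X : List Int) (out : Int) : Prop := out = sum_distances_py_alt X
instance (X : List Int) (out : Int) : Decidable (Spec_sum_distances_py X out) := by unfold Spec_sum_distances_py; infer_instance

-- ===== CLAIM (what is proved, stated in full; the proofs are below) =====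
def Claim_equal_sum_distances_py : Prop := ∀ (X : List Int), Dom_sum_distances_py X → Spec_sum_distances_py X (sum_distances_py X)

-- ===== LEMMAS AND PROOFS =====

/-- Sum of |x - y| over all unordered pairs of the list. -/
def pairSum : List Int → Int
  | [] => 0
  | x :: r => (r.map (fun y => |x - y|)).sum + pairSum r

-- B's loop computes pairSum.
theorem alt_loop (xs : List Int) (t : Int) :
    xs.foldl
      (fun (st : Int × List Int) x =>
        let rest := st.2.tail
        (rest.foldl (fun a y => a + |x - y|) st.1, rest)) (t, xs)
      = (t + pairSum xs, []) := by
  induction xs generalizing t with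
  | nil => simp [pairSum]
  | cons x r ih =>
    simp only [List.foldl_cons, List.tail_cons]
    rw [PySem.List.foldl_add, ih]
    simp [pairSum]; ring

theorem alt_eq_pairSum (X : List Int) : sum_distances_py_alt X = 2 * pairSum X := by
  unfold sum_distances_py_alt
  simp only [PySem.List.slice_from_one]
  rw [alt_loop]
  simp

-- permutation invariance of pairSum
theorem sum_map_add_pair (r : List Int) (f g : Int → Int) :
    (r.map (fun z => f z + g z)).sum = (r.map f).sum + (r.map g).sum := by
  induction r with
  | nil => simp
  | cons a b ih => simp [ih]; ring

theorem two_pairSum (xs : List Int) :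
    2 * pairSum xs = (xs.map (fun x => (xs.map (fun y => |x - y|)).sum)).sum := by
  induction xs with
  | nil => simp [pairSum]
  | cons x r ih =>
    have h2 : (r.map (fun z => |z - x|)).sum = (r.map (fun y => |x - y|)).sum := by
      congr 1
      exact List.map_congr_left (fun a _ => abs_sub_comm a x)
    simp only [pairSum, List.map_cons, List.sum_cons,
      sum_map_add_pair r (fun z => |z - x|) (fun z => (r.map (fun y => |z - y|)).sum),
      sub_self, abs_zero, h2, ← ih]
    ring

theorem pairSum_perm {xs ys : List Int} (h : xs.Perm ys) : pairSum xs = pairSum ys := by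
  have hin : ∀ z : Int, (xs.map (fun y => |z - y|)).sum = (ys.map (fun y => |z - y|)).sum :=
    fun z => (h.map _).sum_eq
  have : 2 * pairSum xs = 2 * pairSum ys := by
    rw [two_pairSum, two_pairSum]
    calc (xs.map (fun x => (xs.map (fun y => |x - y|)).sum)).sum
        = (xs.map (fun x => (ys.map (fun y => |x - y|)).sum)).sum := by
            congr 1; exact List.map_congr_left (fun a _ => hin a)
      _ = (ys.map (fun x => (ys.map (fun y => |x - y|)).sum)).sum := (h.map _).sum_eq
  omega

theorem pairSum_append_singleton (ys : List Int) (z : Int) :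
    pairSum (ys ++ [z]) = pairSum ys + (ys.map (fun y => |y - z|)).sum := by
  induction ys with
  | nil => simp [pairSum]
  | cons a b ih => simp [pairSum, ih]; ring

theorem sum_map_sub (ys : List Int) (z : Int) :
    (ys.map (fun y => z - y)).sum = (ys.length : Int) * z - ys.sum := by
  induction ys with
  | nil => simp
  | cons a b ih => simp [ih]; push_cast; ring

-- A's loop invariant on the sorted list.
theorem a_loop (s : List Int) (hs : s.Pairwise (· ≤ ·)) (m : Nat) (hm : m < s.length) :
    (PySem.List.pyRange 1 ((m : Int) + 1) 1).foldl
      (fun (st : Int × Int) i =>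
        let local_add := i * (PySem.List.pyGetD s i 0 - PySem.List.pyGetD s (i - 1) 0)
        (st.1 + st.2 + local_add, st.2 + local_add)) (0, 0)
      = (pairSum (s.take (m + 1)), (m : Int) * s.getD m 0 - (s.take m).sum) := by
  induction m with
  | zero =>
    rw [PySem.List.pyRange_one_eq_nil (by omega)]
    rcases s with _ | ⟨a, b⟩
    · simp at hm
    · simp [pairSum]
  | succ m ih =>
    have hm' : m < s.length := by omega
    have hsplit : PySem.List.pyRange 1 ((m : Int) + 1 + 1) 1
        = PySem.List.pyRange 1 ((m : Int) + 1) 1 ++ [(m : Int) + 1] := by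
      exact_mod_cast PySem.List.pyRange_one_succ_right (a := 1) (b := (m : Int) + 1) (by omega)
    have hc : (((m + 1 : Nat)) : Int) = (m : Int) + 1 := by push_cast; ring
    rw [hc, hsplit, List.foldl_append, ih hm']
    simp only [List.foldl_cons, List.foldl_nil]
    have hg1 : PySem.List.pyGetD s ((m : Int) + 1) 0 = s.getD (m + 1) 0 := by
      rw [show ((m : Int) + 1) = ((m + 1 : Nat) : Int) by push_cast; ring,
        PySem.List.pyGetD_natCast]
    have hg2 : PySem.List.pyGetD s ((m : Int) + 1 - 1) 0 = s.getD m 0 := by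
      rw [show ((m : Int) + 1 - 1) = ((m : Nat) : Int) by push_cast; ring,
        PySem.List.pyGetD_natCast]
    have htake : s.take (m + 1) = s.take m ++ [s.getD m 0] := by
      rw [List.take_add_one]
      congr 1
      rw [List.getElem?_eq_getElem hm', List.getD_eq_getElem _ _ hm']
      simp
    have htake2 : s.take (m + 1 + 1) = s.take (m + 1) ++ [s.getD (m + 1) 0] := by
      rw [List.take_add_one]
      congr 1
      rw [List.getElem?_eq_getElem hm, List.getD_eq_getElem _ _ hm]
      simp
    have hlen : (s.take (m + 1)).length = m + 1 := by
      rw [List.length_take]; omega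
    have hle : ∀ y ∈ s.take (m + 1), y ≤ s.getD (m + 1) 0 := by
      intro y hy
      rw [List.mem_iff_getElem] at hy
      obtain ⟨i, hi, rfl⟩ := hy
      rw [List.getElem_take, List.getD_eq_getElem _ _ hm]
      have hij : i < m + 1 := by omega
      exact (List.pairwise_iff_getElem.mp hs) i (m + 1) (by omega) hm hij
    have habs : ((s.take (m + 1)).map (fun y => |y - s.getD (m + 1) 0|)).sum
        = ((m : Int) + 1) * s.getD (m + 1) 0 - (s.take (m + 1)).sum := by
      rw [List.map_congr_left (l := s.take (m + 1))
        (f := fun y => |y - s.getD (m + 1) 0|) (g := fun y => s.getD (m + 1) 0 - y)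
        (fun a ha => by
          have := hle a ha
          show |a - s.getD (m + 1) 0| = s.getD (m + 1) 0 - a
          rw [abs_sub_comm]; exact abs_of_nonneg (sub_nonneg.mpr this))]
      rw [sum_map_sub, hlen]; push_cast; ring
    have hsum : (s.take (m + 1)).sum = (s.take m).sum + s.getD m 0 := by
      rw [htake]; simp
    simp only [Prod.mk.injEq]
    constructor
    · rw [hg1, hg2, htake2, pairSum_append_singleton, habs, hsum]; ring
    · rw [hg1, hg2, hsum]; push_cast; ring

theorem a_eq_pairSum (X : List Int) :
    sum_distances_py X = 2 * pairSum (PySem.List.sorted X (fun x => x) false) := by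
  have hs : (PySem.List.sorted X (fun x => x) false).Pairwise (· ≤ ·) := by
    simpa using PySem.List.sorted_pairwise X (fun x => x)
  unfold sum_distances_py
  generalize PySem.List.sorted X (fun x => x) false = s at hs ⊢
  show ((PySem.List.pyRange 1 (s.length : Int) 1).foldl
      (fun (st : Int × Int) i =>
        let local_add := i * (PySem.List.pyGetD s i 0 - PySem.List.pyGetD s (i - 1) 0)
        (st.1 + st.2 + local_add, st.2 + local_add)) (0, 0)).1 * 2
      = 2 * pairSum s
  cases s with
  | nil => simp [pairSum, PySem.List.pyRange_one_eq_nil]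
  | cons a b =>
    have hm : b.length < (a :: b).length := by simp
    have hL := a_loop (a :: b) hs b.length hm
    have hlen : (((a :: b).length : Int)) = ((b.length : Int) + 1) := by
      simp [List.length_cons]
    rw [hlen, hL, List.take_of_length_le (by simp)]
    ring

-- ===== VERDICT (by name: the statement is the Claim_ definition above) =====
theorem sum_distances_py_spec : Claim_equal_sum_distances_py := by
  intro X _
  unfold Spec_sum_distances_py
  rw [a_eq_pairSum, alt_eq_pairSum,
    pairSum_perm (PySem.List.sorted_perm X (fun x => x) false)]
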